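-- pv_equiv track=rewrite | github.com/KiloMusician/ChatDev2 | ecosystem/NuSyQ-Hub/src/system/run_protocol.py | build_handoff_template
-- ===== SOURCE A (Python) =====
-- from collections.abc import Iterable
--
-- def build_handoff_template(
--     changes: Iterable[str],
--     next_actions: Iterable[str],
--     do_not_touch: Iterable[str] | None = None,
--     impact: Iterable[str] | None = None,
--     suggested_agent: str | None = None,
-- ) -> str:
--     lines = []
--     lines.append("# Handoff")
--     lines.append("## What changed")
--     lines.extend(f"- {c}" for c in changes)
--     lines.append("## Next actions")
--     lines.extend(f"- {a}" for a in next_actions)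
--     if do_not_touch:
--         lines.append("## Do NOT touch")
--         lines.extend(f"- {d}" for d in do_not_touch)
--     if impact:
--         lines.append("## Impact / blast radius")
--         lines.extend(f"- {i}" for i in impact)
--     if suggested_agent:
--         lines.append(f"## Suggested next agent: {suggested_agent}")
--     return "\n".join(lines)
-- ===== SOURCE B (Python) =====
-- def build_handoff_template(
--     changes,
--     next_actions,
--     do_not_touch=None,
--     impact=None,
--     suggested_agent=None,
-- ):
--     # Build the document BACK-TO-FRONT as one string: start from the last
--     # (optional) parts and prepend each section block; no line list, no join.
--     tail = ""
--     if suggested_agent: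
--         tail = f"\n## Suggested next agent: {suggested_agent}"
--     if impact:
--         tail = "\n## Impact / blast radius" + "".join(f"\n- {i}" for i in impact) + tail
--     if do_not_touch:
--         tail = "\n## Do NOT touch" + "".join(f"\n- {d}" for d in do_not_touch) + tail
--     tail = "\n## Next actions" + "".join(f"\n- {a}" for a in next_actions) + tail
--     tail = "\n## What changed" + "".join(f"\n- {c}" for c in changes) + tail
--     return "# Handoff" + tail
-- ===== Notes on version B (the rewrite author's own statement) =====
-- stated objective: alternative
-- what changed: B abandons A's list-of-lines-then-join construction entirely: it builds the document back-to-front as a single string accumulator, prepending each section block (header plus ''-joined '\n- item' bullets) in reverse order, starting from the optional suggested-agent line; there is no lines list and no final '\n'.join.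
import Mathlib
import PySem

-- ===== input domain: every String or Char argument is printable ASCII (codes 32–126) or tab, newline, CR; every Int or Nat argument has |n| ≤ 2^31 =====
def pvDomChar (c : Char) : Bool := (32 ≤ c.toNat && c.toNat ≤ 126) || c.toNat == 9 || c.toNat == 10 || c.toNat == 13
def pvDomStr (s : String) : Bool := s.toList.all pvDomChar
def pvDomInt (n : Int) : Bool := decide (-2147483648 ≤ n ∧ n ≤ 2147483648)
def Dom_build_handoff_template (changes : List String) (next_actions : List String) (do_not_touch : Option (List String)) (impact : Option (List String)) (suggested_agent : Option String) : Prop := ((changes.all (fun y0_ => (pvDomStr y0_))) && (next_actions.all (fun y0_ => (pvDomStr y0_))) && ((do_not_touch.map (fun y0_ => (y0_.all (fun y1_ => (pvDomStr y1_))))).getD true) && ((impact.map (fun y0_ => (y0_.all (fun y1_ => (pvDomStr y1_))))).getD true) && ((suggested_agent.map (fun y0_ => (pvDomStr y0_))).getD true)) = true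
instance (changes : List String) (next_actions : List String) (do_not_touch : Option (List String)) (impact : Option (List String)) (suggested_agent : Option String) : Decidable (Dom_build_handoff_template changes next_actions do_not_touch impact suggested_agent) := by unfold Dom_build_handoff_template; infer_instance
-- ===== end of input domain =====

-- B: builds the document back-to-front as one string accumulator (prepending section blocks, bullets joined with ''), instead of A's list-of-lines plus final '\n'.join; alternative structure, same cost.


-- ===== PORT A =====
def build_handoff_template (changes : List String) (next_actions : List String) (do_not_touch : Option (List String)) (impact : Option (List String)) (suggested_agent : Option String) : String :=
  let lines : List String := []
  let lines := lines ++ ["# Handoff"]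
  let lines := lines ++ ["## What changed"]
  let lines := lines ++ changes.map (fun c => "- " ++ c)
  let lines := lines ++ ["## Next actions"]
  let lines := lines ++ next_actions.map (fun a => "- " ++ a)
  let lines := match do_not_touch with
    | some l => if l.isEmpty then lines else lines ++ ["## Do NOT touch"] ++ l.map (fun d => "- " ++ d)
    | none => lines
  let lines := match impact with
    | some l => if l.isEmpty then lines else lines ++ ["## Impact / blast radius"] ++ l.map (fun i => "- " ++ i)
    | none => lines
  let lines := match suggested_agent with
    | some s => if s = "" then lines else lines ++ ["## Suggested next agent: " ++ s]
    | none => lines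
  PySem.Str.join "\n" lines

-- ===== PORT B =====
-- "".join(f"\n- {x}" for x in items)
def pvBullets (items : List String) : String :=
  PySem.Str.join "" (items.map (fun x => "\n- " ++ x))

def build_handoff_template_alt (changes : List String) (next_actions : List String) (do_not_touch : Option (List String)) (impact : Option (List String)) (suggested_agent : Option String) : String :=
  let tail : String := ""
  let tail := match suggested_agent with
    | some s => if s = "" then tail else "\n## Suggested next agent: " ++ s
    | none => tail
  let tail := match impact with
    | some l => if l.isEmpty then tail else "\n## Impact / blast radius" ++ pvBullets l ++ tail
    | none => tail
  let tail := match do_not_touch with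
    | some l => if l.isEmpty then tail else "\n## Do NOT touch" ++ pvBullets l ++ tail
    | none => tail
  let tail := "\n## Next actions" ++ pvBullets next_actions ++ tail
  let tail := "\n## What changed" ++ pvBullets changes ++ tail
  "# Handoff" ++ tail

-- ===== PRECONDITION & SPEC =====
def Spec_build_handoff_template (changes : List String) (next_actions : List String) (do_not_touch : Option (List String)) (impact : Option (List String)) (suggested_agent : Option String) (out : String) : Prop := out = build_handoff_template_alt changes next_actions do_not_touch impact suggested_agent
instance (changes : List String) (next_actions : List String) (do_not_touch : Option (List String)) (impact : Option (List String)) (suggested_agent : Option String) (out : String) : Decidable (Spec_build_handoff_template changes next_actions do_not_touch impact suggested_agent out) := by unfold Spec_build_handoff_template; infer_instance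

-- ===== CLAIM (what is proved, stated in full; the proofs are below) =====
def Claim_equal_build_handoff_template : Prop := ∀ (changes : List String) (next_actions : List String) (do_not_touch : Option (List String)) (impact : Option (List String)) (suggested_agent : Option String), Dom_build_handoff_template changes next_actions do_not_touch impact suggested_agent → Spec_build_handoff_template changes next_actions do_not_touch impact suggested_agent (build_handoff_template changes next_actions do_not_touch impact suggested_agent)

-- ===== LEMMAS AND PROOFS =====

-- "\n" prepended to every later line, then concatenated: the tail of a '\n'.join
def pvTailStr (rest : List String) : String :=
  PySem.Str.join "" (rest.map (fun s => "\n" ++ s))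

theorem pvJoin_empty_sep (parts : List String) :
    PySem.Str.join "" parts = String.ofList ((parts.map String.toList).flatten) := by
  simp [PySem.Str.join, PySem.Chars.join, List.intercalate]
  induction parts with
  | nil => simp
  | cons x xs ih =>
    cases xs with
    | nil => simp
    | cons y ys =>
      simp_all

theorem pvJoin_nl_cons (x : String) (rest : List String) :
    PySem.Str.join "\n" (x :: rest) = x ++ pvTailStr rest := by
  unfold pvTailStr
  rw [pvJoin_empty_sep]
  induction rest generalizing x with
  | nil =>
    apply String.toList_injective
    simp [PySem.Str.join, PySem.Chars.join, List.intercalate]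
  | cons y ys ih =>
    have h : PySem.Str.join "\n" (x :: y :: ys) =
        x ++ "\n" ++ PySem.Str.join "\n" (y :: ys) := by
      apply String.toList_injective
      simp [PySem.Str.join, PySem.Chars.join, List.intercalate]
    rw [h, ih y]
    apply String.toList_injective
    simp [String.toList_append]

theorem pvJoin_nl_append (x : String) (rest : List String) :
    PySem.Str.join "\n" ([x] ++ rest) = x ++ pvTailStr rest := pvJoin_nl_cons x rest

theorem pvTailStr_nil : pvTailStr [] = "" := rfl

theorem pvTailStr_append (a b : List String) :
    pvTailStr (a ++ b) = pvTailStr a ++ pvTailStr b := by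
  unfold pvTailStr
  rw [pvJoin_empty_sep, pvJoin_empty_sep, pvJoin_empty_sep]
  apply String.toList_injective
  simp

theorem pvTailStr_single (h : String) : pvTailStr [h] = "\n" ++ h := by
  unfold pvTailStr
  rw [pvJoin_empty_sep]
  apply String.toList_injective
  simp

theorem pvTailStr_cons (h : String) (rest : List String) :
    pvTailStr (h :: rest) = "\n" ++ h ++ pvTailStr rest := by
  have := pvTailStr_append [h] rest
  simpa [pvTailStr_single, String.append_assoc] using this

theorem pvTailStr_bullets (items : List String) :
    pvTailStr (items.map (fun c => "- " ++ c)) = pvBullets items := by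
  unfold pvTailStr pvBullets
  rw [pvJoin_empty_sep, pvJoin_empty_sep]
  apply String.toList_injective
  simp only [String.toList_ofList, List.map_map]
  refine congrArg List.flatten (List.map_congr_left fun c _ => ?_)
  simp [Function.comp_def, String.toList_append]

theorem pvNlAgent (s : String) :
    "\n" ++ ("## Suggested next agent: " ++ s) = "\n## Suggested next agent: " ++ s := by
  rw [← String.append_assoc]
  apply String.toList_injective
  simp [String.toList_append]

-- ===== VERDICT (by name: the statement is the Claim_ definition above) =====
theorem build_handoff_template_spec : Claim_equal_build_handoff_template := by
  intro changes next_actions do_not_touch impact suggested_agent _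
  unfold Spec_build_handoff_template build_handoff_template build_handoff_template_alt
  rcases do_not_touch with _ | dnt <;> rcases impact with _ | imp <;> rcases suggested_agent with _ | sa <;>
    simp only [List.nil_append] <;> (try split_ifs) <;>
    · simp only [List.append_assoc]
      rw [pvJoin_nl_append]
      simp [pvTailStr_cons, pvTailStr_append, pvTailStr_bullets, pvTailStr_nil,
            pvNlAgent, String.append_assoc]
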